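-- pv_equiv track=rewrite | github.com/Charlarthebar/Pokerbot | rl_bot/player.py | evaluate_preflop_points
-- ===== SOURCE A (Python) =====
-- RANK_TO_INT = {'2': 2, '3': 3, '4': 4, '5': 5, '6': 6, '7': 7, '8': 8, '9': 9,
--                'T': 10, 'J': 11, 'Q': 12, 'K': 13, 'A': 14}
--
-- def evaluate_preflop_points(cards):
--     ranks = sorted([RANK_TO_INT[c[0]] for c in cards], reverse=True)
--     suits = [c[1] for c in cards]
--     points = sum(ranks)
--
--     # Pairs / trips
--     if ranks[0] == ranks[1] or ranks[1] == ranks[2] or ranks[0] == ranks[2]: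
--         points += 20
--         if ranks[0] == ranks[2]:
--             points += 30
--
--     # Suitedness
--     if suits[0] == suits[1] == suits[2]:
--         points += 12
--     elif suits[0] == suits[1] or suits[1] == suits[2] or suits[0] == suits[2]:
--         points += 3
--
--     # Connectivity (in rank-sorted order)
--     gap1 = ranks[0] - ranks[1]
--     gap2 = ranks[1] - ranks[2]
--     if gap1 == 1 and gap2 == 1:
--         points += 12
--     elif gap1 == 1 or gap2 == 1:
--         points += 4
--
--     return points
-- ===== SOURCE B (Python) =====
-- RANK_TO_INT = {'2': 2, '3': 3, '4': 4, '5': 5, '6': 6, '7': 7, '8': 8, '9': 9,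
--                'T': 10, 'J': 11, 'Q': 12, 'K': 13, 'A': 14}
--
-- def evaluate_preflop_points(cards):
--     # One pass: accumulate the rank sum and select the three largest ranks
--     # (descending) without sorting; then add bonuses by arithmetic on counts.
--     total = 0
--     t0 = t1 = t2 = -1
--     for card in cards:
--         r = RANK_TO_INT[card[0]]
--         total += r
--         if r > t0:
--             t0, t1, t2 = r, t0, t1
--         elif r > t1:
--             t1, t2 = r, t1
--         elif r > t2:
--             t2 = r
--     eq = (t0 == t1) + (t1 == t2)          # 0 all distinct, 1 one pair, 2 trips
--     total += 20 * eq + 10 * (eq // 2)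
--     sm = (cards[0][1] == cards[1][1]) + (cards[1][1] == cards[2][1]) + (cards[0][1] == cards[2][1])
--     total += 12 if sm == 3 else 3 * sm
--     conn = (t0 - t1 == 1) + (t1 - t2 == 1)
--     total += 4 * conn + 4 * (conn // 2)
--     return total
-- ===== Notes on version B (the rewrite author's own statement) =====
-- stated objective: alternative
-- what changed: Replaces A's sort-then-index-and-branch structure by a single left-to-right pass that accumulates the rank sum and maintains the three largest ranks in registers (no sort), then derives each bonus arithmetically from equality/gap counts (20*eq+10*(eq//2), 3*sm with a 12 cap, 4*conn+4*(conn//2)) instead of A's if/elif branch chains.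
import Mathlib
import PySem

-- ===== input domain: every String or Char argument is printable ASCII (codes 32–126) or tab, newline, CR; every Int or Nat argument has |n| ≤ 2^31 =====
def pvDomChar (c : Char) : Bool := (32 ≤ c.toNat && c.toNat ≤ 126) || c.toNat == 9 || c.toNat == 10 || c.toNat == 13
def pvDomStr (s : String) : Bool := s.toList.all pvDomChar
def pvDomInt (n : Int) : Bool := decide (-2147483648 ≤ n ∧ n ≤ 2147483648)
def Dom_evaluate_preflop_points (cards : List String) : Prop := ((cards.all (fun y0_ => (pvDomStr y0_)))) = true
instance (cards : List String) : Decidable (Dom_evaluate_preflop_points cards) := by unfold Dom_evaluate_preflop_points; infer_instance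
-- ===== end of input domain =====

-- B replaces A's sort-then-index-and-branch scoring by one pass keeping the three largest
-- ranks in registers plus arithmetic bonus formulas (objective: alternative); equivalence
-- proved on 3+-card hands of well-formed cards.


-- ===== PORT A =====
-- RANK_TO_INT, keyed by the (single) rank character
def rankToInt : PySem.Dict Char Int :=
  PySem.Dict.ofList [('2', 2), ('3', 3), ('4', 4), ('5', 5), ('6', 6), ('7', 7), ('8', 8),
                     ('9', 9), ('T', 10), ('J', 11), ('Q', 12), ('K', 13), ('A', 14)]

-- RANK_TO_INT[c[0]]  (0-defaults only fire outside Pre_)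
def rankOfCard (c : String) : Int :=
  match PySem.Str.pyGet? c 0 with
  | some ch => rankToInt.getD ch 0
  | none => 0

-- c[1]  (the ' ' default only fires outside Pre_)
def suitOfCard (c : String) : Char := (PySem.Str.pyGet? c 1).getD ' '

def evaluate_preflop_points (cards : List String) : Int :=
  let ranks := PySem.List.sorted (cards.map rankOfCard) (fun x => x) true
  let suits := cards.map suitOfCard
  let points0 := ranks.sum
  let r0 := PySem.List.pyGetD ranks 0 0
  let r1 := PySem.List.pyGetD ranks 1 0
  let r2 := PySem.List.pyGetD ranks 2 0
  let points1 :=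
    if r0 = r1 ∨ r1 = r2 ∨ r0 = r2 then
      points0 + 20 + (if r0 = r2 then 30 else 0)
    else points0
  let s0 := PySem.List.pyGetD suits 0 ' '
  let s1 := PySem.List.pyGetD suits 1 ' '
  let s2 := PySem.List.pyGetD suits 2 ' '
  let points2 :=
    if s0 = s1 ∧ s1 = s2 then points1 + 12
    else if s0 = s1 ∨ s1 = s2 ∨ s0 = s2 then points1 + 3
    else points1
  let gap1 := r0 - r1
  let gap2 := r1 - r2
  let points3 :=
    if gap1 = 1 ∧ gap2 = 1 then points2 + 12
    else if gap1 = 1 ∨ gap2 = 1 then points2 + 4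
    else points2
  points3

-- ===== PORT B =====
-- the loop body of B: add the rank to the running sum and slot it into the
-- descending top-three registers (t0, t1, t2)
def pvBStep (st : Int × Int × Int × Int) (card : String) : Int × Int × Int × Int :=
  let r := rankOfCard card
  let total := st.1 + r
  let t0 := st.2.1
  let t1 := st.2.2.1
  let t2 := st.2.2.2
  if r > t0 then (total, r, t0, t1)
  else if r > t1 then (total, t0, r, t1)
  else if r > t2 then (total, t0, t1, r)
  else (total, t0, t1, t2)

def evaluate_preflop_points_alt (cards : List String) : Int :=
  let st := cards.foldl pvBStep (0, -1, -1, -1)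
  let t0 := st.2.1
  let t1 := st.2.2.1
  let t2 := st.2.2.2
  let eq := (if t0 = t1 then (1:Int) else 0) + (if t1 = t2 then 1 else 0)
  let total1 := st.1 + 20 * eq + 10 * (PySem.Int.floordiv eq 2)
  let s0 := suitOfCard (PySem.List.pyGetD cards 0 "")
  let s1 := suitOfCard (PySem.List.pyGetD cards 1 "")
  let s2 := suitOfCard (PySem.List.pyGetD cards 2 "")
  let sm := (if s0 = s1 then (1:Int) else 0) + (if s1 = s2 then 1 else 0) + (if s0 = s2 then 1 else 0)
  let total2 := total1 + (if sm = 3 then 12 else 3 * sm)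
  let conn := (if t0 - t1 = 1 then (1:Int) else 0) + (if t1 - t2 = 1 then 1 else 0)
  total2 + 4 * conn + 4 * (PySem.Int.floordiv conn 2)

-- ===== PRECONDITION & SPEC =====
-- Pre_: at least three cards, each with a valid rank character first and at least a suit
-- character second — exactly the inputs where A raises no KeyError/IndexError.
def Pre_evaluate_preflop_points (cards : List String) : Prop :=
  3 ≤ cards.length ∧
  ∀ c ∈ cards, 2 ≤ c.toList.length ∧
    (c.toList.getD 0 ' ') ∈ (['2', '3', '4', '5', '6', '7', '8', '9', 'T', 'J', 'Q', 'K', 'A'] : List Char)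
instance (cards : List String) : Decidable (Pre_evaluate_preflop_points cards) := by
  unfold Pre_evaluate_preflop_points; infer_instance

def pvWitness_evaluate_preflop_points : List String := ["Ah", "Kd", "Qh"]

def Spec_evaluate_preflop_points (cards : List String) (out : Int) : Prop := out = evaluate_preflop_points_alt cards
instance (cards : List String) (out : Int) : Decidable (Spec_evaluate_preflop_points cards out) := by unfold Spec_evaluate_preflop_points; infer_instance

-- ===== CLAIM (what is proved, stated in full; the proofs are below) =====
def Claim_equal_evaluate_preflop_points : Prop := ∀ (cards : List String), Dom_evaluate_preflop_points cards → Pre_evaluate_preflop_points cards → Spec_evaluate_preflop_points cards (evaluate_preflop_points cards)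

-- ===== LEMMAS AND PROOFS =====

-- descending insertion (the step of PySem's reverse sort with the identity key)
def pvInsD (r : Int) (s : List Int) : List Int :=
  PySem.List.insertBy (fun a b => decide (b < a)) r s

-- the first three elements of a list, padded with the -1 sentinel
def pvTri (s : List Int) : Int × Int × Int := (s.getD 0 (-1), s.getD 1 (-1), s.getD 2 (-1))

theorem pv_rank_nonneg (c : String) : (0:Int) ≤ rankOfCard c := by
  unfold rankOfCard
  cases h : PySem.Str.pyGet? c 0 with
  | none => norm_num
  | some ch =>
    have hv : ∀ p ∈ rankToInt.items, (0:Int) ≤ p.2 := by decide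
    simp only [PySem.Dict.getD, PySem.Dict.get?]
    cases hf : List.find? (fun p => p.1 == ch) rankToInt.items with
    | none => simp
    | some p =>
      simp only [Option.map_some, Option.getD_some]
      exact hv p (List.mem_of_find?_eq_some hf)

theorem pv_insD_pairwise (r : Int) (s : List Int)
    (h : s.Pairwise (fun a b => b ≤ a)) :
    (pvInsD r s).Pairwise (fun a b => b ≤ a) := by
  induction s with
  | nil => simp [pvInsD, PySem.List.insertBy]
  | cons a t ih =>
    rcases List.pairwise_cons.mp h with ⟨ha, ht⟩
    simp only [pvInsD, PySem.List.insertBy]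
    by_cases hlt : a < r
    · rw [if_pos (by simpa using hlt)]
      refine List.pairwise_cons.mpr ⟨?_, h⟩
      intro y hy
      rcases List.mem_cons.mp hy with hy | hy
      · omega
      · have := ha y hy; omega
    · rw [if_neg (by simpa using hlt)]
      refine List.pairwise_cons.mpr ⟨?_, ih ht⟩
      intro y hy
      rcases (PySem.List.mem_insertBy _ _ _ _).mp hy with hy | hy
      · subst hy; omega
      · exact ha y hy

-- slotting r into the top-three registers of a descending list = inserting it and re-reading
theorem pv_step_tri (tot r : Int) (s : List Int)
    (hp : s.Pairwise (fun a b => b ≤ a)) (hr : (0:Int) ≤ r) :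
    (if r > (pvTri s).1 then (tot + r, r, (pvTri s).1, (pvTri s).2.1)
     else if r > (pvTri s).2.1 then (tot + r, (pvTri s).1, r, (pvTri s).2.1)
     else if r > (pvTri s).2.2 then (tot + r, (pvTri s).1, (pvTri s).2.1, r)
     else (tot + r, (pvTri s).1, (pvTri s).2.1, (pvTri s).2.2)) =
    ((tot + r : Int), pvTri (pvInsD r s)) := by
  rcases s with _ | ⟨a, _ | ⟨b, _ | ⟨c, t⟩⟩⟩
  · simp [pvTri, pvInsD, PySem.List.insertBy, show r > (-1:Int) from by omega]
  · simp only [pvTri, pvInsD, PySem.List.insertBy]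
    by_cases h1 : a < r
    · rw [if_pos (by simpa using h1)]
      simp [show r > a from h1]
    · rw [if_neg (by simpa using h1)]
      simp [show ¬ r > a from h1, show r > (-1:Int) from by omega]
  · rcases List.pairwise_cons.mp hp with ⟨ha, _⟩
    have hab : b ≤ a := ha b (by simp)
    simp only [pvTri, pvInsD, PySem.List.insertBy]
    by_cases h1 : a < r
    · rw [if_pos (by simpa using h1)]
      simp [show r > a from h1]
    · rw [if_neg (by simpa using h1)]
      by_cases h2 : b < r
      · rw [if_pos (by simpa using h2)]
        simp [show ¬ r > a from h1, show r > b from h2]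
      · rw [if_neg (by simpa using h2)]
        simp [show ¬ r > a from h1, show ¬ r > b from h2, show r > (-1:Int) from by omega]
  · rcases List.pairwise_cons.mp hp with ⟨ha, hp2⟩
    rcases List.pairwise_cons.mp hp2 with ⟨hb, _⟩
    have hab : b ≤ a := ha b (by simp)
    have hbc : c ≤ b := hb c (by simp)
    simp only [pvTri, pvInsD, PySem.List.insertBy]
    by_cases h1 : a < r
    · rw [if_pos (by simpa using h1)]
      simp [show r > a from h1]
    · rw [if_neg (by simpa using h1)]
      by_cases h2 : b < r
      · rw [if_pos (by simpa using h2)]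
        simp [show ¬ r > a from h1, show r > b from h2]
      · rw [if_neg (by simpa using h2)]
        by_cases h3 : c < r
        · rw [if_pos (by simpa using h3)]
          simp [show ¬ r > a from h1, show ¬ r > b from h2, show r > c from h3]
        · rw [if_neg (by simpa using h3)]
          simp [show ¬ r > a from h1, show ¬ r > b from h2, show ¬ r > c from h3]

-- the scan invariant: B's fold computes the running sum and the top-three of the
-- insertion-sorted (descending) accumulator
theorem pv_scan_inv (l : List String) : ∀ (tot : Int) (s : List Int),
    s.Pairwise (fun a b => b ≤ a) →
    l.foldl pvBStep (tot, pvTri s) =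
      (tot + (l.map rankOfCard).sum,
       pvTri (List.foldl (fun acc x => pvInsD x acc) s (l.map rankOfCard))) := by
  induction l with
  | nil => intro tot s _; simp
  | cons c t ih =>
    intro tot s hp
    have hstep : pvBStep (tot, pvTri s) c = (tot + rankOfCard c, pvTri (pvInsD (rankOfCard c) s)) := by
      rw [← pv_step_tri tot (rankOfCard c) s hp (pv_rank_nonneg c)]
      simp only [pvBStep]
    simp only [List.foldl_cons, hstep, List.map_cons, List.sum_cons]
    rw [ih (tot + rankOfCard c) (pvInsD (rankOfCard c) s) (pv_insD_pairwise _ _ hp)]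
    ring_nf

-- pair/trips: A's branch chain = B's 20*eq + 10*(eq // 2), for descending ranks
theorem pv_pair (r0 r1 r2 : Int) (h10 : r1 ≤ r0) (h21 : r2 ≤ r1) :
    (if r0 = r1 ∨ r1 = r2 ∨ r0 = r2 then (20:Int) + (if r0 = r2 then 30 else 0) else 0) =
      20 * ((if r0 = r1 then (1:Int) else 0) + (if r1 = r2 then 1 else 0)) +
      10 * PySem.Int.floordiv ((if r0 = r1 then (1:Int) else 0) + (if r1 = r2 then 1 else 0)) 2 := by
  by_cases h01 : r0 = r1
  · by_cases h12 : r1 = r2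
    · have h02 : r0 = r2 := h01.trans h12
      rw [if_pos (Or.inl h01), if_pos h02, if_pos h01, if_pos h12]
      decide
    · have h02 : ¬ r0 = r2 := fun h => h12 (h01.symm.trans h)
      rw [if_pos (Or.inl h01), if_neg h02, if_pos h01, if_neg h12]
      decide
  · by_cases h12 : r1 = r2
    · have h02 : ¬ r0 = r2 := fun h => h01 (h.trans h12.symm)
      rw [if_pos (Or.inr (Or.inl h12)), if_neg h02, if_neg h01, if_pos h12]
      decide
    · have h02 : ¬ r0 = r2 := by omega
      rw [if_neg (by tauto), if_neg h01, if_neg h12]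
      decide

-- suitedness: A's branch chain = B's 3*sm with the 12 cap
theorem pv_suit (s0 s1 s2 : Char) :
    (if s0 = s1 ∧ s1 = s2 then (12:Int) else if s0 = s1 ∨ s1 = s2 ∨ s0 = s2 then 3 else 0) =
      (if ((if s0 = s1 then (1:Int) else 0) + (if s1 = s2 then 1 else 0) + (if s0 = s2 then 1 else 0)) = 3
       then 12
       else 3 * ((if s0 = s1 then (1:Int) else 0) + (if s1 = s2 then 1 else 0) + (if s0 = s2 then 1 else 0))) := by
  by_cases h01 : s0 = s1 <;> by_cases h12 : s1 = s2 <;> by_cases h02 : s0 = s2 <;>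
    simp_all

-- connectivity: A's branch chain = B's 4*conn + 4*(conn // 2)
theorem pv_conn (r0 r1 r2 : Int) :
    (if r0 - r1 = 1 ∧ r1 - r2 = 1 then (12:Int) else if r0 - r1 = 1 ∨ r1 - r2 = 1 then 4 else 0) =
      4 * ((if r0 - r1 = 1 then (1:Int) else 0) + (if r1 - r2 = 1 then 1 else 0)) +
      4 * PySem.Int.floordiv ((if r0 - r1 = 1 then (1:Int) else 0) + (if r1 - r2 = 1 then 1 else 0)) 2 := by
  by_cases h1 : r0 - r1 = 1
  · by_cases h2 : r1 - r2 = 1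
    · rw [if_pos ⟨h1, h2⟩, if_pos h1, if_pos h2]
      decide
    · rw [if_neg (by tauto), if_pos (Or.inl h1), if_pos h1, if_neg h2]
      decide
  · by_cases h2 : r1 - r2 = 1
    · rw [if_neg (by tauto), if_pos (Or.inr h2), if_neg h1, if_pos h2]
      decide
    · rw [if_neg (by tauto), if_neg (by tauto), if_neg h1, if_neg h2]
      decide

-- the core arithmetic fact: A's additive branch chains equal B's count formulas,
-- for descending ranks a ≥ b ≥ c and arbitrary suits
theorem pv_core (S a b c : Int) (s0 s1 s2 : Char) (hab : b ≤ a) (hbc : c ≤ b) :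
    (let points1 := if a = b ∨ b = c ∨ a = c then S + 20 + (if a = c then 30 else 0) else S
     let points2 :=
       if s0 = s1 ∧ s1 = s2 then points1 + 12
       else if s0 = s1 ∨ s1 = s2 ∨ s0 = s2 then points1 + 3
       else points1
     if a - b = 1 ∧ b - c = 1 then points2 + 12
     else if a - b = 1 ∨ b - c = 1 then points2 + 4
     else points2) =
    (let eq := (if a = b then (1:Int) else 0) + (if b = c then 1 else 0)
     let total1 := S + 20 * eq + 10 * PySem.Int.floordiv eq 2
     let sm := (if s0 = s1 then (1:Int) else 0) + (if s1 = s2 then 1 else 0) + (if s0 = s2 then 1 else 0)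
     let total2 := total1 + (if sm = 3 then 12 else 3 * sm)
     let conn := (if a - b = 1 then (1:Int) else 0) + (if b - c = 1 then 1 else 0)
     total2 + 4 * conn + 4 * PySem.Int.floordiv conn 2) := by
  have step1 :
      (let points1 := if a = b ∨ b = c ∨ a = c then S + 20 + (if a = c then 30 else 0) else S
       let points2 :=
         if s0 = s1 ∧ s1 = s2 then points1 + 12
         else if s0 = s1 ∨ s1 = s2 ∨ s0 = s2 then points1 + 3
         else points1
       if a - b = 1 ∧ b - c = 1 then points2 + 12
       else if a - b = 1 ∨ b - c = 1 then points2 + 4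
       else points2) =
      S + (if a = b ∨ b = c ∨ a = c then (20:Int) + (if a = c then 30 else 0) else 0)
        + (if s0 = s1 ∧ s1 = s2 then (12:Int) else if s0 = s1 ∨ s1 = s2 ∨ s0 = s2 then 3 else 0)
        + (if a - b = 1 ∧ b - c = 1 then (12:Int) else if a - b = 1 ∨ b - c = 1 then 4 else 0) := by
    simp only []
    split_ifs <;> ring
  simp only []
  rw [step1, pv_pair a b c hab hbc, pv_suit s0 s1 s2, pv_conn a b c]
  ring

-- ===== VERDICT (by name: the statement is the Claim_ definition above) =====
set_option maxHeartbeats 2000000 in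
theorem evaluate_preflop_points_spec : Claim_equal_evaluate_preflop_points := by
  intro cards _ hpre
  obtain ⟨hlen, -⟩ := hpre
  unfold Spec_evaluate_preflop_points
  obtain ⟨c0, c1, c2, rest, rfl⟩ : ∃ c0 c1 c2 rest, cards = c0 :: c1 :: c2 :: rest := by
    rcases cards with _ | ⟨c0, _ | ⟨c1, _ | ⟨c2, rest⟩⟩⟩
    · simp at hlen
    · simp at hlen
    · simp at hlen
    · exact ⟨c0, c1, c2, rest, rfl⟩
  -- B's scan = (sum of all ranks, top three of the descending sort)
  have hfold : (c0 :: c1 :: c2 :: rest).foldl pvBStep (0, -1, -1, -1) =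
      (((c0 :: c1 :: c2 :: rest).map rankOfCard).sum,
       pvTri (PySem.List.sorted ((c0 :: c1 :: c2 :: rest).map rankOfCard) (fun x => x) true)) := by
    have h0 : ((0:Int), (-1:Int), (-1:Int), (-1:Int)) = ((0:Int), pvTri ([] : List Int)) := by
      simp [pvTri]
    rw [h0, pv_scan_inv _ 0 [] (by simp), PySem.List.sorted_rev_eq_foldl_insertBy]
    simp [pvInsD]
  -- the sorted rank list has length ≥ 3; name its first three elements
  have hlen' : 3 ≤ (PySem.List.sorted ((c0 :: c1 :: c2 :: rest).map rankOfCard) (fun x => x) true).length := by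
    rw [PySem.List.length_sorted]; simp
  obtain ⟨a, b, c, t, hs⟩ : ∃ a b c t,
      PySem.List.sorted ((c0 :: c1 :: c2 :: rest).map rankOfCard) (fun x => x) true = a :: b :: c :: t := by
    rcases hq : PySem.List.sorted ((c0 :: c1 :: c2 :: rest).map rankOfCard) (fun x => x) true with
      _ | ⟨a, _ | ⟨b, _ | ⟨c, t⟩⟩⟩
    · rw [hq] at hlen'; simp at hlen'
    · rw [hq] at hlen'; simp at hlen'
    · rw [hq] at hlen'; simp at hlen'
    · exact ⟨a, b, c, t, rfl⟩
  have hsum : (a :: b :: c :: t).sum = ((c0 :: c1 :: c2 :: rest).map rankOfCard).sum := by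
    rw [← hs]
    exact (PySem.List.sorted_perm _ _ _).sum_eq
  have hpw := PySem.List.sorted_pairwise_rev ((c0 :: c1 :: c2 :: rest).map rankOfCard) (fun x => x)
  rw [hs] at hpw hfold
  rcases List.pairwise_cons.mp hpw with ⟨hha, hpw2⟩
  rcases List.pairwise_cons.mp hpw2 with ⟨hhb, -⟩
  have hab : b ≤ a := hha b (by simp)
  have hbc : c ≤ b := hhb c (by simp)
  have htri : pvTri (a :: b :: c :: t) = (a, b, c) := by simp [pvTri]
  rw [htri] at hfold
  -- evaluate both sides down to a, b, c and the three suits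
  have g0 : PySem.List.pyGetD (a :: b :: c :: t) 0 0 = a := by
    simp [pysem]
  have g1 : PySem.List.pyGetD (a :: b :: c :: t) 1 0 = b := by
    simp [pysem]
  have g2 : PySem.List.pyGetD (a :: b :: c :: t) 2 0 = c := by
    simp [pysem]
  have q0 : PySem.List.pyGetD ((c0 :: c1 :: c2 :: rest).map suitOfCard) 0 ' ' = suitOfCard c0 := by
    simp [pysem]
  have q1 : PySem.List.pyGetD ((c0 :: c1 :: c2 :: rest).map suitOfCard) 1 ' ' = suitOfCard c1 := by
    simp [pysem]
  have q2 : PySem.List.pyGetD ((c0 :: c1 :: c2 :: rest).map suitOfCard) 2 ' ' = suitOfCard c2 := by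
    simp [pysem]
  have p0 : PySem.List.pyGetD (c0 :: c1 :: c2 :: rest) 0 "" = c0 := by
    simp [pysem]
  have p1 : PySem.List.pyGetD (c0 :: c1 :: c2 :: rest) 1 "" = c1 := by
    simp [pysem]
  have p2 : PySem.List.pyGetD (c0 :: c1 :: c2 :: rest) 2 "" = c2 := by
    simp [pysem]
  simp only [evaluate_preflop_points, evaluate_preflop_points_alt, hs, hfold,
             g0, g1, g2, q0, q1, q2, p0, p1, p2, hsum]
  exact pv_core _ a b c (suitOfCard c0) (suitOfCard c1) (suitOfCard c2) hab hbc
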